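-- pv_equiv track=rewrite | github.com/biobakery/biobakery_workflows | biobakery_workflows/utilities.py | taxa_by_level
-- ===== SOURCE A (Python) =====
-- def taxa_remove_unclassified(taxa, delimiter=";"):
--     """ Rename the taxa to remove the unclassified levels
--
--         Args:
--             taxa (list): The list of taxa.
--             delimiter (str): The string delimiter (usually pipe or semi-colon).
--
--         Requires:
--             None
--
--         Returns:
--             (list): The list of taxa after removing the unclassified names.
--     """
--
--     # remove any levels where the name is unknown (ie empty)
--     for taxon in taxa:
--         new_name=[]
--         for level in taxon.replace(" ","").split(delimiter):
--             try:
--                 rank, name = level.split("__")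
--             except ValueError:
--                 # ignore identities like "unclassified" if present
--                 continue
--             if name:
--                 new_name.append(level)
--             else:
--                 break
--         yield delimiter.join(new_name)
--
-- def taxa_by_level(taxa, data, level, keep_unclassified=None):
--     """ Combine the data to represent the taxa by a specific level
--
--         Args:
--             taxa (list): The list of taxa (in the same order as the data).
--             data (list of lists): The data points for all samples for each taxa.
--             level (int): The level to sum the taxa (zero is kingdom level).
--             keep_unclassified (bool): If set, keep unclassified taxa.
--
--         Requires:
--             None
--
--         Returns:
--             (list): The list of taxa (all to the level specified)
--             (list of lists): The data after summing to the taxa level specified.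
--     """
--
--     # first remove any unclassified levels
--     if not keep_unclassified:
--         taxa=taxa_remove_unclassified(taxa)
--
--     # sum the taxa by the level provided
--     data_sum={}
--     for taxon, taxon_data in zip(taxa, data):
--         split_taxon=taxon.split(";")
--         if len(split_taxon) < (level+1):
--             # do not include those taxa that are not specified to the level requested
--             continue
--         new_taxon_level=";".join(split_taxon[:(level+1)])
--         if new_taxon_level in data_sum:
--             data_sum[new_taxon_level]=[a+b for a,b in zip(data_sum[new_taxon_level],taxon_data)]
--         else:
--             data_sum[new_taxon_level]=taxon_data
--
--     new_taxa=[]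
--     new_data=[]
--     for taxon, taxon_data in data_sum.items():
--         new_taxa.append(taxon)
--         new_data.append(taxon_data)
--
--     return new_taxa, new_data
-- ===== SOURCE B (Python) =====
-- def _clean(taxon, delimiter=";"):
--     # keep the well-formed "rank__name" levels, up to (not including) the first empty name
--     levels = [lv for lv in taxon.replace(" ", "").split(delimiter)
--               if len(lv.split("__")) == 2]
--     kept = []
--     for lv in levels:
--         if lv.split("__")[1] == "":
--             break
--         kept.append(lv)
--     return delimiter.join(kept)
--
-- def taxa_by_level(taxa, data, level, keep_unclassified=None):
--     if not keep_unclassified: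
--         taxa = [_clean(t) for t in taxa]
--     # group the raw data rows by truncated taxon, first-occurrence order
--     groups = {}
--     for taxon, row in zip(taxa, data):
--         parts = taxon.split(";")
--         if len(parts) >= level + 1:
--             key = ";".join(parts[:level + 1])
--             groups[key] = groups.get(key, []) + [row]
--     new_taxa = []
--     new_data = []
--     for key, rows in groups.items():
--         total = rows[0]
--         for r in rows[1:]:
--             total = [a + b for a, b in zip(total, r)]
--         new_taxa.append(key)
--         new_data.append(total)
--     return new_taxa, new_data
-- ===== Notes on version B (the rewrite author's own statement) =====
-- stated objective: alternative
-- what changed: B collects the raw data rows of each truncated-taxon group in a dict (first-occurrence order) and sums each group in a second phase, and does the unclassified cleanup by filter-then-break instead of A's generator with a running-sum accumulator.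
import Mathlib
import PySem

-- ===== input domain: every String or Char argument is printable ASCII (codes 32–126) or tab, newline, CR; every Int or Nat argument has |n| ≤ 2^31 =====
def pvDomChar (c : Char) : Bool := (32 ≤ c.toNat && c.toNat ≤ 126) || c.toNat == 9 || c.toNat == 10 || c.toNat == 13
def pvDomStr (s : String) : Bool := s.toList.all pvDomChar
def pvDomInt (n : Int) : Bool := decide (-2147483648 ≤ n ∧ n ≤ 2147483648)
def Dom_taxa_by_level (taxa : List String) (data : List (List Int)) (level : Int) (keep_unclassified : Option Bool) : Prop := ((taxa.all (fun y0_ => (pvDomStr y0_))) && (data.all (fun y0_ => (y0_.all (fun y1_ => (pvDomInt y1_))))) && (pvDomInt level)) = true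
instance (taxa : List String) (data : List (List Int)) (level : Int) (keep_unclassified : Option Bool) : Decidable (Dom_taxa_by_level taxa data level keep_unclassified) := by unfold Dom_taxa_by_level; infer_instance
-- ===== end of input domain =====

-- B groups the raw data rows per truncated taxon in a dict and sums each group afterwards
-- (filter+takeWhile for the unclassified cleanup), instead of A's generator + running-sum dict;
-- alternative decomposition, same results.


-- ===== PORT A =====
-- inner loop of taxa_remove_unclassified: append well-formed levels, break at an empty name
def pvCollectA : List String → List String
  | [] => []
  | lv :: rest =>
    match PySem.Str.split? lv "__" with
    | some [_rank, name] => if name ≠ "" then lv :: pvCollectA rest else []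
    | _ => pvCollectA rest   -- ValueError on unpacking → continue

def pvRemoveUnclassifiedA (taxon : String) : String :=
  PySem.Str.join ";" (pvCollectA ((PySem.Str.split? (PySem.Str.replace taxon " " "") ";").getD []))

-- the data_sum loop of A: running element-wise sum per truncated key
def pvSumA (pairs : List (String × List Int)) (level : Int) : PySem.Dict String (List Int) :=
  pairs.foldl (fun d p =>
    let split_taxon := (PySem.Str.split? p.1 ";").getD []
    if (split_taxon.length : Int) < level + 1 then d
    else
      let key := PySem.Str.join ";" (PySem.List.slice split_taxon none (some (level + 1)))
      match d.get? key with
      | some old => d.insert key (List.zipWith (· + ·) old p.2)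
      | none => d.insert key p.2) PySem.Dict.empty

def taxa_by_level (taxa : List String) (data : List (List Int)) (level : Int) (keep_unclassified : Option Bool) : List String × List (List Int) :=
  let taxa' := if keep_unclassified.getD false then taxa else taxa.map pvRemoveUnclassifiedA
  let d := pvSumA (taxa'.zip data) level
  (d.keys, d.values)

-- ===== PORT B =====
def pvWF (lv : String) : Bool := ((PySem.Str.split? lv "__").getD []).length == 2
def pvName (lv : String) : String := PySem.List.pyGetD ((PySem.Str.split? lv "__").getD []) 1 ""

def pvCleanB (taxon : String) : String :=
  let wf := ((PySem.Str.split? (PySem.Str.replace taxon " " "") ";").getD []).filter pvWF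
  PySem.Str.join ";" (wf.takeWhile (fun lv => pvName lv ≠ ""))

-- B's grouping loop: collect the raw rows of each group
def pvGroupB (pairs : List (String × List Int)) (level : Int) : PySem.Dict String (List (List Int)) :=
  pairs.foldl (fun d p =>
    let parts := (PySem.Str.split? p.1 ";").getD []
    if level + 1 ≤ (parts.length : Int) then
      let key := PySem.Str.join ";" (PySem.List.slice parts none (some (level + 1)))
      d.insert key (d.getD key [] ++ [p.2])
    else d) PySem.Dict.empty

-- total = rows[0] then element-wise sums over rows[1:]
def pvReduce : List (List Int) → List Int
  | [] => []
  | h :: t => t.foldl (fun acc r => List.zipWith (· + ·) acc r) h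

def taxa_by_level_alt (taxa : List String) (data : List (List Int)) (level : Int) (keep_unclassified : Option Bool) : List String × List (List Int) :=
  let taxa' := if keep_unclassified.getD false then taxa else taxa.map pvCleanB
  let d := pvGroupB (taxa'.zip data) level
  (d.keys, d.items.map (fun p => pvReduce p.2))

-- ===== PRECONDITION & SPEC =====
def Spec_taxa_by_level (taxa : List String) (data : List (List Int)) (level : Int) (keep_unclassified : Option Bool) (out : List String × List (List Int)) : Prop := out = taxa_by_level_alt taxa data level keep_unclassified
instance (taxa : List String) (data : List (List Int)) (level : Int) (keep_unclassified : Option Bool) (out : List String × List (List Int)) : Decidable (Spec_taxa_by_level taxa data level keep_unclassified out) := by unfold Spec_taxa_by_level; infer_instance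

-- ===== CLAIM (what is proved, stated in full; the proofs are below) =====
def Claim_equal_taxa_by_level : Prop := ∀ (taxa : List String) (data : List (List Int)) (level : Int) (keep_unclassified : Option Bool), Dom_taxa_by_level taxa data level keep_unclassified → Spec_taxa_by_level taxa data level keep_unclassified (taxa_by_level taxa data level keep_unclassified)

-- ===== LEMMAS AND PROOFS =====

theorem collectA_eq (ls : List String) :
    pvCollectA ls = (ls.filter pvWF).takeWhile (fun lv => pvName lv ≠ "") := by
  induction ls with
  | nil => rfl
  | cons lv rest ih =>
    simp only [pvCollectA, List.filter_cons]
    rcases h : PySem.Str.split? lv "__" with _ | parts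
    · simp [pvWF, h, ih]
    · match parts with
      | [] => simp [pvWF, h, ih]
      | [x] => simp [pvWF, h, ih]
      | [r, n] =>
        by_cases hn : n = "" <;>
          simp [pvWF, h, pvName, PySem.List.pyGetD, hn, ih]
      | x :: y :: z :: rest' => simp [pvWF, h, ih]

theorem clean_eq (t : String) : pvRemoveUnclassifiedA t = pvCleanB t := by
  simp [pvRemoveUnclassifiedA, pvCleanB, collectA_eq]

def pvF (p : String × List (List Int)) : String × List Int := (p.1, pvReduce p.2)

def pvInv (dA : PySem.Dict String (List Int)) (dB : PySem.Dict String (List (List Int))) : Prop :=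
  dA.items = dB.items.map pvF ∧ (∀ p ∈ dB.items, p.2 ≠ []) ∧ dB.keys.Nodup

theorem keys_of_inv {dA : PySem.Dict String (List Int)} {dB : PySem.Dict String (List (List Int))}
    (h : pvInv dA dB) : dA.keys = dB.keys := by
  simp only [PySem.Dict.keys, h.1, List.map_map]
  rfl

theorem reduce_append (rs : List (List Int)) (r : List Int) (h : rs ≠ []) :
    pvReduce (rs ++ [r]) = List.zipWith (· + ·) (pvReduce rs) r := by
  match rs with
  | [] => exact absurd rfl h
  | a :: t => simp [pvReduce, List.foldl_append]

theorem step_inv (dA : PySem.Dict String (List Int)) (dB : PySem.Dict String (List (List Int)))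
    (level : Int) (p : String × List Int) (h : pvInv dA dB) :
    pvInv
      ((fun d (p : String × List Int) =>
        let split_taxon := (PySem.Str.split? p.1 ";").getD []
        if (split_taxon.length : Int) < level + 1 then d
        else
          let key := PySem.Str.join ";" (PySem.List.slice split_taxon none (some (level + 1)))
          match d.get? key with
          | some old => d.insert key (List.zipWith (· + ·) old p.2)
          | none => d.insert key p.2) dA p)
      ((fun d (p : String × List Int) =>
        let parts := (PySem.Str.split? p.1 ";").getD []
        if level + 1 ≤ (parts.length : Int) then
          let key := PySem.Str.join ";" (PySem.List.slice parts none (some (level + 1)))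
          d.insert key (d.getD key [] ++ [p.2])
        else d) dB p) := by
  obtain ⟨hitems, hne, hnd⟩ := h
  simp only []
  set parts := (PySem.Str.split? p.1 ";").getD [] with hp
  by_cases hlen : (parts.length : Int) < level + 1
  · rw [if_pos hlen, if_neg (by omega)]
    exact ⟨hitems, hne, hnd⟩
  · rw [if_neg hlen, if_pos (by omega)]
    set key := PySem.Str.join ";" (PySem.List.slice parts none (some (level + 1))) with hk
    have hndA : dA.keys.Nodup := by rw [keys_of_inv ⟨hitems, hne, hnd⟩]; exact hnd
    by_cases hc : dB.contains key = true
    · -- key already present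
      rcases hgb : dB.get? key with _ | rs
      · rw [PySem.Dict.get?_eq_none_iff_contains] at hgb
        simp [hgb] at hc
      · have hmemB : (key, rs) ∈ dB.items := PySem.Dict.mem_items_of_get?_eq_some _ hgb
        have hrsne : rs ≠ [] := hne _ hmemB
        have hmemA : (key, pvReduce rs) ∈ dA.items := by
          rw [hitems]; exact List.mem_map_of_mem hmemB
        have hga : dA.get? key = some (pvReduce rs) :=
          PySem.Dict.get?_of_mem_items _ hmemA hndA
        have hgd : dB.getD key [] = rs := PySem.Dict.getD_of_get?_eq_some _ _ hgb
        rw [hga, hgd]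
        have hcA : dA.contains key = true := by
          rw [PySem.Dict.contains_eq_isSome_get?, hga]; rfl
        refine ⟨?_, ?_, ?_⟩
        · rw [PySem.Dict.items_insert_of_contains _ _ hcA,
              PySem.Dict.items_insert_of_contains _ _ hc, hitems,
              List.map_map, List.map_map]
          apply List.map_congr_left
          intro q hq
          by_cases hq1 : q.1 = key
          · have : dB.get? key = some q.2 := by
              have := PySem.Dict.get?_of_mem_items _ (show (q.1, q.2) ∈ dB.items from hq) hnd
              rwa [hq1] at this
            have hq2 : q.2 = rs := by
              rw [hgb] at this; exact (Option.some.inj this).symm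
            simp [Function.comp, pvF, hq1, hq2, reduce_append rs p.2 hrsne]
          · simp [Function.comp, pvF, hq1]
        · intro q hq
          rw [PySem.Dict.items_insert_of_contains _ _ hc] at hq
          rcases List.mem_map.mp hq with ⟨q0, hq0, hq0eq⟩
          by_cases hq01 : q0.1 == key
          · rw [if_pos hq01] at hq0eq
            subst hq0eq; simp
          · rw [if_neg hq01] at hq0eq
            subst hq0eq; exact hne _ hq0
        · exact PySem.Dict.nodup_keys_insert _ _ _ hnd
    · -- fresh key
      have hcB : dB.contains key = false := by simpa using hc
      have hga : dA.get? key = none := by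
        rw [PySem.Dict.get?_eq_none_iff_contains]
        rw [PySem.Dict.contains_eq_decide_mem_keys, keys_of_inv ⟨hitems, hne, hnd⟩,
            ← PySem.Dict.contains_eq_decide_mem_keys]
        exact hcB
      have hcA : dA.contains key = false := by
        rw [PySem.Dict.contains_eq_isSome_get?, hga]; rfl
      have hgd : dB.getD key [] = [] := PySem.Dict.getD_of_not_contains _ _ hcB
      rw [hga, hgd]
      refine ⟨?_, ?_, ?_⟩
      · rw [PySem.Dict.items_insert_of_not_contains _ _ hcA,
            PySem.Dict.items_insert_of_not_contains _ _ hcB, hitems, List.map_append]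
        rfl
      · intro q hq
        rw [PySem.Dict.items_insert_of_not_contains _ _ hcB] at hq
        rcases List.mem_append.mp hq with hq | hq
        · exact hne _ hq
        · simp at hq; subst hq; simp
      · exact PySem.Dict.nodup_keys_insert _ _ _ hnd

theorem fold_inv (pairs : List (String × List Int)) (level : Int) :
    pvInv (pvSumA pairs level) (pvGroupB pairs level) := by
  suffices h : ∀ dA dB, pvInv dA dB →
      pvInv
        (pairs.foldl (fun d p =>
          let split_taxon := (PySem.Str.split? p.1 ";").getD []
          if (split_taxon.length : Int) < level + 1 then d
          else
            let key := PySem.Str.join ";" (PySem.List.slice split_taxon none (some (level + 1)))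
            match d.get? key with
            | some old => d.insert key (List.zipWith (· + ·) old p.2)
            | none => d.insert key p.2) dA)
        (pairs.foldl (fun d p =>
          let parts := (PySem.Str.split? p.1 ";").getD []
          if level + 1 ≤ (parts.length : Int) then
            let key := PySem.Str.join ";" (PySem.List.slice parts none (some (level + 1)))
            d.insert key (d.getD key [] ++ [p.2])
          else d) dB) by
    exact h PySem.Dict.empty PySem.Dict.empty ⟨rfl, by simp [PySem.Dict.empty], by simp [PySem.Dict.empty, PySem.Dict.keys]⟩
  induction pairs with
  | nil => intro dA dB h; exact h
  | cons p rest ih =>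
    intro dA dB h
    simp only [List.foldl_cons]
    exact ih _ _ (step_inv dA dB level p h)

theorem main_eq (pairs : List (String × List Int)) (level : Int) :
    ((pvSumA pairs level).keys, (pvSumA pairs level).values)
      = ((pvGroupB pairs level).keys, (pvGroupB pairs level).items.map (fun p => pvReduce p.2)) := by
  obtain ⟨hitems, hne, hnd⟩ := fold_inv pairs level
  refine Prod.ext (keys_of_inv ⟨hitems, hne, hnd⟩) ?_
  simp only [PySem.Dict.values, hitems, List.map_map]
  rfl

-- ===== VERDICT (by name: the statement is the Claim_ definition above) =====
theorem taxa_by_level_spec : Claim_equal_taxa_by_level := by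
  intro taxa data level ku _
  show taxa_by_level taxa data level ku = taxa_by_level_alt taxa data level ku
  show ((pvSumA ((if ku.getD false then taxa else taxa.map pvRemoveUnclassifiedA).zip data) level).keys,
        (pvSumA ((if ku.getD false then taxa else taxa.map pvRemoveUnclassifiedA).zip data) level).values)
      = ((pvGroupB ((if ku.getD false then taxa else taxa.map pvCleanB).zip data) level).keys,
         (pvGroupB ((if ku.getD false then taxa else taxa.map pvCleanB).zip data) level).items.map (fun p => pvReduce p.2))
  have hmap : taxa.map pvRemoveUnclassifiedA = taxa.map pvCleanB :=
    List.map_congr_left (fun t _ => clean_eq t)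
  rw [hmap]
  exact main_eq ((if ku.getD false then taxa else taxa.map pvCleanB).zip data) level
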